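-- pv_equiv track=rewrite | github.com/SheldonWong/algo | python/recursive/test111.py | arrayPrint
-- ===== SOURCE A (Python) =====
-- def arrayPrint(arr, n):
--     # write code here
--     res = []
--     row = [[0,n-1-i] for i in range(n)]
--     col = [[i,0] for i in range(n)]
--
--     for e in row:
--         while(e[0] < n and e[1] < n):
--             res.append(arr[e[0]][e[1]])
--             e[0] = e[0] + 1
--             e[1] = e[1] + 1
--     for e in col:
--         if e[0] == 0 and e[1] == 0:
--             continue
--         while(e[0] < n and e[1] < n):
--             res.append(arr[e[0]][e[1]])
--             e[0] = e[0] + 1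
--             e[1] = e[1] + 1
--     return res
-- ===== SOURCE B (Python) =====
-- def arrayPrint(arr, n):
--     buckets = {}
--     for i in range(n):
--         for j in range(n):
--             buckets.setdefault(j - i, []).append(arr[i][j])
--     res = []
--     for k in range(n - 1, -n, -1):
--         res += buckets.get(k, [])
--     return res
-- ===== Notes on version B (the rewrite author's own statement) =====
-- stated objective: simpler
-- what changed: Replaced A's two phases of mutable coordinate pairs walked diagonal-by-diagonal with a single row-major scan that groups each element into a dict bucket keyed by j-i, then emits buckets for k from n-1 down to -(n-1).
import Mathlib
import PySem

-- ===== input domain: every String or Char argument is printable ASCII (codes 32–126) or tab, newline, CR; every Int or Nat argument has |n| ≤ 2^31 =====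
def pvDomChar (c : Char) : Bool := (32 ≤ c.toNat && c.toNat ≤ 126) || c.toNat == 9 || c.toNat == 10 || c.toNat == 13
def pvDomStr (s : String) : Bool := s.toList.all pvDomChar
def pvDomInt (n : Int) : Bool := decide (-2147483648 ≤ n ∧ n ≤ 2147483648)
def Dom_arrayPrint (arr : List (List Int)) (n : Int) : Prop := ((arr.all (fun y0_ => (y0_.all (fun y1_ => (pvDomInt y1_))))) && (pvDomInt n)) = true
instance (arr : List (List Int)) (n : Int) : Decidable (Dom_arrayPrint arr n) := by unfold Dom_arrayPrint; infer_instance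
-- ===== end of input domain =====

-- B replaces A's two phases of mutated coordinate pairs with one row-major scan into
-- dict buckets keyed by j - i, emitted for k from n-1 down to -(n-1) (objective: simpler).

-- arr[i][j]; exact under Pre_ (indices in range there)
def pvVal (arr : List (List Int)) (i j : Int) : Int :=
  PySem.List.pyGetD (PySem.List.pyGetD arr i []) j 0

-- ===== PORT A =====
-- the while loop: walks down-right from (i, j) appending to res
def walkA (arr : List (List Int)) (n i j : Int) (res : List Int) : List Int :=
  if _h : i < n ∧ j < n then
    walkA arr n (i + 1) (j + 1) (res ++ [pvVal arr i j])
  else res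
termination_by (n - i).toNat
decreasing_by omega

def arrayPrint (arr : List (List Int)) (n : Int) : List Int :=
  let row := (PySem.List.pyRange 0 n 1).map (fun i => ((0 : Int), n - 1 - i))
  let col := (PySem.List.pyRange 0 n 1).map (fun i => (i, (0 : Int)))
  let res := row.foldl (fun res e => walkA arr n e.1 e.2 res) ([] : List Int)
  col.foldl (fun res e => if e.1 == 0 && e.2 == 0 then res else walkA arr n e.1 e.2 res) res

-- ===== PORT B =====
def arrayPrint_alt (arr : List (List Int)) (n : Int) : List Int :=
  let buckets := (PySem.List.pyRange 0 n 1).foldl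
    (fun d i => (PySem.List.pyRange 0 n 1).foldl
      (fun d j => d.modify (j - i) ([] : List Int) (fun l => l ++ [pvVal arr i j])) d)
    PySem.Dict.empty
  (PySem.List.pyRange (n - 1) (-n) (-1)).foldl (fun res k => res ++ buckets.getD k []) ([] : List Int)

-- ===== PRECONDITION & SPEC =====
-- Pre_ excludes exactly the inputs on which the Pythons raise IndexError: n > 0 while arr
-- has fewer than n rows or one of the first n rows has fewer than n entries.
def Pre_arrayPrint (arr : List (List Int)) (n : Int) : Prop :=
  0 < n → (n ≤ (arr.length : Int) ∧ ∀ r ∈ arr.take n.toNat, n ≤ (r.length : Int))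
instance (arr : List (List Int)) (n : Int) : Decidable (Pre_arrayPrint arr n) := by
  unfold Pre_arrayPrint; infer_instance

def pvWitness_arrayPrint : List (List Int) × Int := ([[1, 2], [3, 4]], 2)

def Spec_arrayPrint (arr : List (List Int)) (n : Int) (out : List Int) : Prop := out = arrayPrint_alt arr n
instance (arr : List (List Int)) (n : Int) (out : List Int) : Decidable (Spec_arrayPrint arr n out) := by unfold Spec_arrayPrint; infer_instance

-- ===== CLAIM (what is proved, stated in full; the proofs are below) =====
def Claim_equal_arrayPrint : Prop := ∀ (arr : List (List Int)) (n : Int), Dom_arrayPrint arr n → Pre_arrayPrint arr n → Spec_arrayPrint arr n (arrayPrint arr n)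

-- ===== LEMMAS AND PROOFS =====

-- one diagonal (key k = j - i), in increasing-i order
def pvDiag (arr : List (List Int)) (n k : Int) : List Int :=
  (PySem.List.pyRange 0 n 1).flatMap
    (fun i => if 0 ≤ i + k ∧ i + k < n then [pvVal arr i (i + k)] else [])

lemma pv_walkA_stop (arr : List (List Int)) (n i j : Int) (res : List Int)
    (hc : ¬ (i < n ∧ j < n)) : walkA arr n i j res = res := by
  rw [walkA, dif_neg hc]

lemma pv_walkA_step (arr : List (List Int)) (n i j : Int) (res : List Int)
    (hc : i < n ∧ j < n) :
    walkA arr n i j res = walkA arr n (i + 1) (j + 1) (res ++ [pvVal arr i j]) := by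
  rw [walkA, dif_pos hc]

lemma pv_walk_acc (arr : List (List Int)) (n : Int) :
    ∀ (t : Nat) (i j : Int) (res : List Int), (n - i).toNat ≤ t →
      walkA arr n i j res = res ++ walkA arr n i j [] := by
  intro t
  induction t with
  | zero =>
    intro i j res h
    rw [pv_walkA_stop arr n i j res (by omega), pv_walkA_stop arr n i j [] (by omega)]
    simp
  | succ t ih =>
    intro i j res h
    by_cases hc : i < n ∧ j < n
    · rw [pv_walkA_step arr n i j res hc, pv_walkA_step arr n i j [] hc]
      rw [ih (i + 1) (j + 1) (res ++ [pvVal arr i j]) (by omega),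
          ih (i + 1) (j + 1) ([] ++ [pvVal arr i j]) (by omega)]
      simp
    · rw [pv_walkA_stop arr n i j res hc, pv_walkA_stop arr n i j [] hc]; simp

lemma pv_walk_map (arr : List (List Int)) (n : Int) :
    ∀ (t : Nat) (i j : Int), (n - max i j).toNat = t →
      walkA arr n i j []
        = (List.range t).map (fun s : Nat => pvVal arr (i + (s : Int)) (j + (s : Int))) := by
  intro t
  induction t with
  | zero =>
    intro i j h
    rw [pv_walkA_stop arr n i j [] (by omega)]; simp
  | succ t ih =>
    intro i j h
    rw [pv_walkA_step arr n i j [] (by constructor <;> omega)]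
    rw [List.nil_append]
    rw [pv_walk_acc arr n ((n - (i + 1)).toNat) (i + 1) (j + 1) _ le_rfl]
    rw [ih (i + 1) (j + 1) (by omega)]
    rw [List.range_succ_eq_map, List.map_cons, List.map_map, List.singleton_append]
    have hh : pvVal arr (i + ((0 : Nat) : Int)) (j + ((0 : Nat) : Int)) = pvVal arr i j := by
      norm_num
    rw [hh]
    congr 1
    apply List.map_congr_left
    intro s _
    simp only [Function.comp]
    congr 1 <;> push_cast <;> ring

lemma pv_bucket_fold (arr : List (List Int)) (n : Int) (l : List Int) :
    ∀ (d : PySem.Dict Int (List Int)),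
      l.foldl (fun d i => (PySem.List.pyRange 0 n 1).foldl
          (fun d j => d.modify (j - i) ([] : List Int) (fun l => l ++ [pvVal arr i j])) d) d
        = (l.flatMap (fun i => (PySem.List.pyRange 0 n 1).map
              (fun j => ((j - i : Int), pvVal arr i j)))).foldl
            (fun d p => d.modify p.1 ([] : List Int) (fun l => l ++ [p.2])) d := by
  induction l with
  | nil => intro d; simp
  | cons a l ih =>
    intro d
    simp only [List.foldl_cons, List.flatMap_cons, List.foldl_append, List.foldl_map]
    exact ih _

lemma pv_flatMap_singleton {α β : Type} (l : List α) (f : α → β) :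
    l.flatMap (fun x => [f x]) = l.map f := by
  induction l with
  | nil => simp
  | cons a l ih => simp [ih]

lemma pv_flatMap_congr {α β : Type} (l : List α) (f g : α → List β)
    (h : ∀ x ∈ l, f x = g x) : l.flatMap f = l.flatMap g := by
  induction l with
  | nil => simp
  | cons a l ih =>
    simp only [List.flatMap_cons]
    rw [h a (by simp), ih (fun x hx => h x (by simp [hx]))]

lemma pv_filter_beq_pyRange (a b m : Int) :
    (PySem.List.pyRange a b 1).filter (fun j => j == m)
      = if a ≤ m ∧ m < b then [m] else [] := by
  rw [List.filter_beq]
  by_cases h : a ≤ m ∧ m < b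
  · rw [if_pos h]
    rw [List.count_eq_one_of_mem (PySem.List.nodup_pyRange_one a b)
        (PySem.List.mem_pyRange_one.mpr h)]
    simp
  · rw [if_neg h]
    rw [List.count_eq_zero.mpr (fun hm => h (PySem.List.mem_pyRange_one.mp hm))]
    simp

lemma pv_bucket_getD (arr : List (List Int)) (n k : Int) :
    ((PySem.List.pyRange 0 n 1).foldl
      (fun d i => (PySem.List.pyRange 0 n 1).foldl
        (fun d j => d.modify (j - i) ([] : List Int) (fun l => l ++ [pvVal arr i j])) d)
      PySem.Dict.empty).getD k [] = pvDiag arr n k := by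
  rw [pv_bucket_fold arr n (PySem.List.pyRange 0 n 1) PySem.Dict.empty]
  rw [PySem.Dict.getD_foldl_modify_append]
  rw [PySem.Dict.getD_empty]
  rw [List.nil_append, pvDiag]
  rw [List.filter_flatMap, List.map_flatMap]
  apply pv_flatMap_congr
  intro i _
  simp only [List.filter_map, List.map_map]
  have hp : ∀ j ∈ PySem.List.pyRange 0 n 1,
      ((fun p : Int × Int => p.1 == k) ∘ fun j => (j - i, pvVal arr i j)) j
        = (fun j => j == i + k) j := by
    intro j _
    simp only [Function.comp]
    by_cases h : j - i = k
    · have h2 : j = i + k := by omega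
      simp [h2]
    · have h2 : ¬ (j = i + k) := by omega
      simp [h, h2]
  rw [List.filter_congr hp, pv_filter_beq_pyRange]
  by_cases h : 0 ≤ i + k ∧ i + k < n
  · rw [if_pos h, if_pos (by omega)]
    simp
  · rw [if_neg h, if_neg (by omega)]
    simp

lemma pv_row_diag (arr : List (List Int)) (n k : Int) (h0 : 0 ≤ k) (h1 : k < n) :
    walkA arr n 0 k [] = pvDiag arr n k := by
  rw [pv_walk_map arr n (n - k).toNat 0 k (by omega)]
  rw [pvDiag, PySem.List.pyRange_one_append 0 (n - k) n (by omega) (by omega),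
      List.flatMap_append]
  have h2 : (PySem.List.pyRange (n - k) n 1).flatMap
      (fun i => if 0 ≤ i + k ∧ i + k < n then [pvVal arr i (i + k)] else []) = [] := by
    rw [pv_flatMap_congr _ _ (fun _ => ([] : List Int))
      (fun i hi => by
        rw [PySem.List.mem_pyRange_one] at hi
        rw [if_neg (by omega)])]
    simp
  rw [h2, List.append_nil]
  rw [pv_flatMap_congr _ _ (fun i => [pvVal arr i (i + k)])
    (fun i hi => by
      rw [PySem.List.mem_pyRange_one] at hi
      rw [if_pos (by omega)])]
  rw [pv_flatMap_singleton]
  rw [PySem.List.pyRange_one, List.map_map]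
  simp only [sub_zero]
  apply List.map_congr_left
  intro s _
  simp only [Function.comp]
  congr 1 <;> push_cast <;> ring

lemma pv_col_diag (arr : List (List Int)) (n i : Int) (h0 : 0 < i) (h1 : i < n) :
    walkA arr n i 0 [] = pvDiag arr n (-i) := by
  rw [pv_walk_map arr n (n - i).toNat i 0 (by omega)]
  rw [pvDiag, PySem.List.pyRange_one_append 0 i n (by omega) (by omega),
      List.flatMap_append]
  have h2 : (PySem.List.pyRange 0 i 1).flatMap
      (fun x => if 0 ≤ x + -i ∧ x + -i < n then [pvVal arr x (x + -i)] else []) = [] := by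
    rw [pv_flatMap_congr _ _ (fun _ => ([] : List Int))
      (fun x hx => by
        rw [PySem.List.mem_pyRange_one] at hx
        rw [if_neg (by omega)])]
    simp
  rw [h2, List.nil_append]
  rw [pv_flatMap_congr _ _ (fun x => [pvVal arr x (x + -i)])
    (fun x hx => by
      rw [PySem.List.mem_pyRange_one] at hx
      rw [if_pos (by omega)])]
  rw [pv_flatMap_singleton]
  rw [PySem.List.pyRange_one, List.map_map]
  apply List.map_congr_left
  intro s _
  simp only [Function.comp]
  congr 1 <;> push_cast <;> ring

lemma pv_ks_split (n : Int) (hn : 0 < n) :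
    PySem.List.pyRange (n - 1) (-n) (-1)
      = (PySem.List.pyRange 0 n 1).map (fun i => n - 1 - i)
        ++ (PySem.List.pyRange 1 n 1).map (fun i => -i) := by
  rw [PySem.List.pyRange_neg_one]
  have hsplit : ((n - 1) - (-n)).toNat = n.toNat + (n - 1).toNat := by omega
  rw [hsplit, List.range_add, List.map_append, List.map_map]
  congr 1
  · rw [PySem.List.pyRange_one, List.map_map]
    simp only [sub_zero]
    apply List.map_congr_left
    intro s _
    simp only [Function.comp]
    omega
  · rw [PySem.List.pyRange_one, List.map_map]
    apply List.map_congr_left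
    intro s hs
    rw [List.mem_range] at hs
    simp only [Function.comp]
    push_cast
    omega

lemma pv_rowfold (arr : List (List Int)) (n : Int) (l : List (Int × Int)) :
    ∀ (res : List Int),
      l.foldl (fun res e => walkA arr n e.1 e.2 res) res
        = res ++ l.flatMap (fun e => walkA arr n e.1 e.2 []) := by
  induction l with
  | nil => intro res; simp
  | cons e l ih =>
    intro res
    simp only [List.foldl_cons, List.flatMap_cons]
    rw [ih, pv_walk_acc arr n ((n - e.1).toNat) e.1 e.2 res le_rfl, List.append_assoc]

lemma pv_colfold (arr : List (List Int)) (n : Int) (l : List (Int × Int)) :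
    ∀ (res : List Int),
      l.foldl (fun res e => if e.1 == 0 && e.2 == 0 then res else walkA arr n e.1 e.2 res) res
        = res ++ l.flatMap (fun e => if e.1 == 0 && e.2 == 0 then [] else walkA arr n e.1 e.2 []) := by
  induction l with
  | nil => intro res; simp
  | cons e l ih =>
    intro res
    simp only [List.foldl_cons, List.flatMap_cons]
    by_cases hc : (e.1 == 0 && e.2 == 0) = true
    · rw [if_pos hc, if_pos hc, ih, List.nil_append]
    · rw [if_neg hc, if_neg hc, ih,
          pv_walk_acc arr n ((n - e.1).toNat) e.1 e.2 res le_rfl, List.append_assoc]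

lemma pv_main (arr : List (List Int)) (n : Int) :
    arrayPrint arr n = arrayPrint_alt arr n := by
  by_cases hn : n ≤ 0
  · rw [arrayPrint, arrayPrint_alt]
    rw [PySem.List.pyRange_one_eq_nil hn,
        PySem.List.pyRange_neg_one_eq_nil (by omega)]
    simp
  · rw [not_le] at hn
    rw [arrayPrint, arrayPrint_alt]
    -- B side
    rw [PySem.List.foldl_append_eq_flatMap]
    rw [pv_flatMap_congr _ _ (fun k => pvDiag arr n k)
      (fun k _ => pv_bucket_getD arr n k)]
    rw [pv_ks_split n hn, List.flatMap_append, List.flatMap_map, List.flatMap_map]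
    -- A side
    rw [pv_rowfold, pv_colfold, List.flatMap_map, List.flatMap_map]
    simp only [List.nil_append]
    congr 1
    · -- row chunk
      apply pv_flatMap_congr
      intro i hi
      rw [PySem.List.mem_pyRange_one] at hi
      exact pv_row_diag arr n (n - 1 - i) (by omega) (by omega)
    · -- col chunk
      rw [pv_flatMap_congr _ _
          (fun i => if i = 0 then [] else walkA arr n i 0 [])
          (fun i _ => by
            by_cases h : i = 0
            · simp [h]
            · simp [h])]
      have h01 : PySem.List.pyRange 0 1 1 = [(0 : Int)] := by
        rw [PySem.List.pyRange_one_cons (by norm_num), PySem.List.pyRange_one_eq_nil (a := 0 + 1) (b := 1) (by norm_num)]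
      rw [PySem.List.pyRange_one_append 0 1 n (by omega) (by omega),
          List.flatMap_append, h01]
      have h0 : ([(0 : Int)]).flatMap
          (fun i => if i = 0 then [] else walkA arr n i 0 []) = [] := by simp
      rw [h0, List.nil_append]
      apply pv_flatMap_congr
      intro i hi
      rw [PySem.List.mem_pyRange_one] at hi
      rw [if_neg (by omega)]
      exact pv_col_diag arr n i (by omega) (by omega)

-- ===== VERDICT (by name: the statement is the Claim_ definition above) =====
theorem arrayPrint_spec : Claim_equal_arrayPrint := by
  intro arr n _ _
  unfold Spec_arrayPrint
  exact pv_main arr n
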